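-- pv_equiv track=rewrite | github.com/KonstFed/DiffIE | src/diffopenie/data/lsoie.py | _is_label_continous
-- ===== SOURCE A (Python) =====
-- def _is_label_continous(labels: list[str], prefix: str) -> bool:
--     """Check if given label is continous"""
--     first_index = next(
--         (i for i, lab in enumerate(labels) if lab.startswith(prefix)), None
--     )
--     last_index = next(
--         (i for i in range(len(labels) - 1, -1, -1) if labels[i].startswith(prefix)),
--         None,
--     )
--     if first_index is None or last_index is None:
--         return False
--     return all(lab.startswith(prefix) for lab in labels[first_index : last_index + 1])
-- ===== SOURCE B (Python) =====
-- def _is_label_continous(labels: list[str], prefix: str) -> bool: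
--     """One pass: collect matching indices; matches are contiguous iff span == count."""
--     idxs = [i for i, lab in enumerate(labels) if lab.startswith(prefix)]
--     if not idxs:
--         return False
--     return idxs[-1] - idxs[0] + 1 == len(idxs)
-- ===== Notes on version B (the rewrite author's own statement) =====
-- stated objective: simpler
-- what changed: A scans forward for the first match, scans a reversed index range for the last match, then re-checks the slice between them with all(); B collects the matching indices in one enumerate pass and decides contiguity by integer arithmetic (last - first + 1 == count).
import Mathlib
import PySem

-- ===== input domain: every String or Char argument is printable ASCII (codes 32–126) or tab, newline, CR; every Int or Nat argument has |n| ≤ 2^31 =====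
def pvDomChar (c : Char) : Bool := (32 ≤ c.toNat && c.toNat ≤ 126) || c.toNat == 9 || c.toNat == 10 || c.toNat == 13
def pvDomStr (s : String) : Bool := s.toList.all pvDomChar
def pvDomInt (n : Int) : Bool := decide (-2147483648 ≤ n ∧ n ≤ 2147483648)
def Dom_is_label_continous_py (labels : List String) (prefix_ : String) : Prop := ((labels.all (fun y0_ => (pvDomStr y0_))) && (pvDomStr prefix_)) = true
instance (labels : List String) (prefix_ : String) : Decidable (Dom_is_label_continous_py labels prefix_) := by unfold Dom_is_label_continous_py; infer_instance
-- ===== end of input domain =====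

-- B changes the decomposition: one index-collecting pass plus span arithmetic instead of A's three scans (simpler).

-- ===== PORT A =====
-- next((i for i, lab in enumerate(labels) if lab.startswith(prefix)), None)
def pvFindFirst (prefix_ : String) : Int → List String → Option Int
  | _, [] => none
  | i, lab :: rest =>
    if PySem.Str.startswith lab prefix_ then some i else pvFindFirst prefix_ (i + 1) rest

-- next((i for i in range(len(labels)-1, -1, -1) if labels[i].startswith(prefix)), None)
-- labels[i] ported as pyGetD with default "": every i produced by the range is in bounds, so this is exact.
def pvFindBack (labels : List String) (prefix_ : String) : List Int → Option Int
  | [] => none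
  | i :: rest =>
    if PySem.Str.startswith (PySem.List.pyGetD labels i "") prefix_ then some i
    else pvFindBack labels prefix_ rest

def is_label_continous_py (labels : List String) (prefix_ : String) : Bool :=
  let first_index := pvFindFirst prefix_ 0 labels
  let last_index := pvFindBack labels prefix_
      (PySem.List.pyRange ((labels.length : Int) - 1) (-1) (-1))
  match first_index, last_index with
  | none, _ => false
  | _, none => false
  | some f, some l =>
    (PySem.List.slice labels (some f) (some (l + 1))).all
      (fun lab => PySem.Str.startswith lab prefix_)

-- ===== PORT B =====
def is_label_continous_py_alt (labels : List String) (prefix_ : String) : Bool :=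
  let idxs : List Int := (PySem.List.enumerate labels 0).filterMap
      (fun q => if PySem.Str.startswith q.2 prefix_ then some q.1 else none)
  match idxs with
  | [] => false
  | h :: t => decide ((h :: t).getLast (by simp) - h + 1 = (((h :: t).length : Nat) : Int))

-- ===== PRECONDITION & SPEC =====
def Spec_is_label_continous_py (labels : List String) (prefix_ : String) (out : Bool) : Prop := out = is_label_continous_py_alt labels prefix_
instance (labels : List String) (prefix_ : String) (out : Bool) : Decidable (Spec_is_label_continous_py labels prefix_ out) := by unfold Spec_is_label_continous_py; infer_instance

-- ===== CLAIM (what is proved, stated in full; the proofs are below) =====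
def Claim_equal_is_label_continous_py : Prop := ∀ (labels : List String) (prefix_ : String), Dom_is_label_continous_py labels prefix_ → Spec_is_label_continous_py labels prefix_ (is_label_continous_py labels prefix_)

-- ===== LEMMAS AND PROOFS =====

theorem pv_findFirst_eq (prefix_ : String) (labels : List String) (s : Int) :
    pvFindFirst prefix_ s labels =
      ((PySem.List.enumerate labels s).filterMap
        (fun q => if PySem.Str.startswith q.2 prefix_ then some q.1 else none)).head? := by
  induction labels generalizing s with
  | nil => simp [pvFindFirst, PySem.List.enumerate_nil]
  | cons x xs ih =>
    rw [PySem.List.enumerate_cons]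
    by_cases h : PySem.Chars.startswith x.toList prefix_.toList = true
    · simp [pvFindFirst, h]
    · simp [pvFindFirst, h, ih]

theorem pv_findBack_eq (labels : List String) (prefix_ : String) (js : List Int) :
    pvFindBack labels prefix_ js =
      (js.filter (fun i => PySem.Str.startswith (PySem.List.pyGetD labels i "") prefix_)).head? := by
  induction js with
  | nil => simp [pvFindBack]
  | cons i rest ih =>
    by_cases h : PySem.Chars.startswith (PySem.List.pyGetD labels i "").toList prefix_.toList = true
    · simp [pvFindBack, h]
    · simp [pvFindBack, h, ih]

theorem pv_filterMap_guard (q : Int → Bool) (js : List Int) :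
    js.filterMap (fun i => if q i then some i else none) = js.filter q := by
  induction js with
  | nil => rfl
  | cons i rest ih =>
    by_cases h : q i = true <;> simp [h, ih]

theorem pv_head_le_getLast (x : Int) (xs : List Int)
    (hp : (x :: xs).Pairwise (· < ·)) : x ≤ (x :: xs).getLast (by simp) := by
  have hm := List.getLast_mem (l := x :: xs) (by simp)
  rcases List.mem_cons.1 hm with h | h
  · exact le_of_eq h.symm
  · exact le_of_lt ((List.pairwise_cons.1 hp).1 _ h)


theorem is_label_continous_py_spec : Claim_equal_is_label_continous_py := by
  intro labels prefix_ _
  unfold Spec_is_label_continous_py is_label_continous_py is_label_continous_py_alt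
  set p : String → Bool := fun lab => PySem.Str.startswith lab prefix_ with hp
  set q : Int → Bool := fun i => PySem.Str.startswith (PySem.List.pyGetD labels i "") prefix_ with hq
  set n : Int := (labels.length : Int) with hn
  -- B's index list equals the filtered index range
  have hI : (PySem.List.enumerate labels 0).filterMap
      (fun r => if PySem.Str.startswith r.2 prefix_ then some r.1 else none)
      = (PySem.List.pyRange 0 n 1).filter q := by
    rw [PySem.List.enumerate_eq_map_pyRange (d := ""), List.filterMap_map]
    rw [show ((fun r : Int × String => if PySem.Str.startswith r.2 prefix_ then some r.1 else none) ∘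
        (fun j => (j, PySem.List.pyGetD labels j ""))) = fun i => if q i then some i else none from rfl]
    exact pv_filterMap_guard q _
  have hfirst : pvFindFirst prefix_ 0 labels = ((PySem.List.pyRange 0 n 1).filter q).head? := by
    rw [pv_findFirst_eq, hI]
  have hlast : pvFindBack labels prefix_ (PySem.List.pyRange (n - 1) (-1) (-1))
      = ((PySem.List.pyRange 0 n 1).filter q).getLast? := by
    rw [pv_findBack_eq]
    rw [show PySem.List.pyRange (n - 1) (-1) (-1) = (PySem.List.pyRange 0 n 1).reverse by
      rw [PySem.List.pyRange_neg_one_eq_reverse]; norm_num]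
    rw [List.filter_reverse, List.head?_reverse]
  rw [hI, hfirst, hlast]
  cases hIc : (PySem.List.pyRange 0 n 1).filter q with
  | nil => simp
  | cons h t =>
    have hne : (h :: t) ≠ ([] : List Int) := by simp
    set l : Int := (h :: t).getLast hne with hl
    have hlast? : (h :: t).getLast? = some l := List.getLast?_eq_some_getLast hne
    simp only [List.head?_cons, hlast?]
    -- ordering and bounds
    have hpair : (h :: t).Pairwise (· < ·) := by
      rw [← hIc]; exact (PySem.List.pairwise_lt_pyRange_one 0 n).filter q
    have hhl : h ≤ l := pv_head_le_getLast h t hpair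
    have hhmem : h ∈ (PySem.List.pyRange 0 n 1) := by
      have : h ∈ (PySem.List.pyRange 0 n 1).filter q := by rw [hIc]; simp
      exact List.mem_of_mem_filter this
    have hlmem : l ∈ (PySem.List.pyRange 0 n 1) := by
      have : l ∈ (PySem.List.pyRange 0 n 1).filter q := by
        rw [hIc]; exact List.getLast_mem hne
      exact List.mem_of_mem_filter this
    have hh : 0 ≤ h ∧ h < n := (PySem.List.mem_pyRange_one).1 hhmem
    have hlb : 0 ≤ l ∧ l < n := (PySem.List.mem_pyRange_one).1 hlmem
    -- split the range at h and l+1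
    have e1 : PySem.List.pyRange 0 n 1
        = PySem.List.pyRange 0 h 1 ++ PySem.List.pyRange h (l+1) 1 ++ PySem.List.pyRange (l+1) n 1 := by
      rw [PySem.List.pyRange_one_append 0 h n hh.1 (by omega),
          PySem.List.pyRange_one_append h (l+1) n (by omega) (by omega), List.append_assoc]
    have hsplit : (PySem.List.pyRange 0 h 1).filter q
        ++ ((PySem.List.pyRange h (l+1) 1).filter q ++ (PySem.List.pyRange (l+1) n 1).filter q)
        = h :: t := by
      rw [← List.filter_append, ← List.filter_append, ← List.append_assoc, ← e1, hIc]
    -- the left piece is empty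
    have hF1 : (PySem.List.pyRange 0 h 1).filter q = [] := by
      cases hc : (PySem.List.pyRange 0 h 1).filter q with
      | nil => rfl
      | cons i rest =>
        exfalso
        have hih : i = h := by
          have := hsplit; rw [hc] at this
          simpa using congrArg List.head? this
        have : i ∈ PySem.List.pyRange 0 h 1 :=
          List.mem_of_mem_filter (by rw [hc]; simp)
        have := (PySem.List.mem_pyRange_one).1 this
        omega
    -- the right piece is empty
    have hF3 : (PySem.List.pyRange (l+1) n 1).filter q = [] := by
      cases hc : (PySem.List.pyRange (l+1) n 1).filter q with
      | nil => rfl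
      | cons i rest =>
        exfalso
        have hlast3 : (i :: rest).getLast? = some l := by
          have hs := hsplit; rw [hc] at hs
          have h2 := congrArg List.getLast? hs
          rw [List.getLast?_append, List.getLast?_append, hlast?] at h2
          have hg : (i :: rest).getLast? = some ((i :: rest).getLast (by simp)) :=
            List.getLast?_eq_some_getLast (by simp)
          rw [hg] at h2 ⊢
          simpa using h2
        have hlm : l ∈ (i :: rest) := List.mem_of_getLast? hlast3
        have : l ∈ PySem.List.pyRange (l+1) n 1 :=
          List.mem_of_mem_filter (by rw [← hc] at hlm; exact hlm)
        have := (PySem.List.mem_pyRange_one).1 this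
        omega
    have hIJ : (PySem.List.pyRange h (l+1) 1).filter q = h :: t := by
      rw [hF1, hF3] at hsplit; simpa using hsplit
    -- A's slice is the mapped middle range
    have hslice : PySem.List.slice labels (some h) (some (l + 1))
        = (PySem.List.pyRange h (l+1) 1).map (fun j => PySem.List.pyGetD labels j "") := by
      rw [PySem.List.slice_toNat labels hh.1 (by omega), PySem.List.pyRange_one]
      apply List.ext_getElem
      · simp
        omega
      · intro k h1 h2
        simp only [List.getElem_take, List.getElem_drop, List.map_map, List.getElem_map,
          List.getElem_range, Function.comp]
        have hk : h.toNat + k < labels.length := by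
          simp at h1; omega
        rw [PySem.List.pyGetD_eq_getElem labels "" (by omega) (by omega)]
        have hidx : (h + (k : Int)).toNat = h.toNat + k := by omega
        simp only [hidx]
    rw [hslice, List.all_map]
    rw [show (p ∘ fun j => PySem.List.pyGetD labels j "") = q from rfl]
    -- B's arithmetic test is the all-true test on the middle range
    have hlen : ((PySem.List.pyRange h (l+1) 1).length : Int) = l - h + 1 := by
      rw [PySem.List.length_pyRange_one]; omega
    have hiff : (l - h + 1 = ((h :: t).length : Int))
        ↔ (PySem.List.pyRange h (l+1) 1).all q = true := by
      constructor
      · intro heq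
        have hlen2 : ((PySem.List.pyRange h (l+1) 1).filter q).length
            = (PySem.List.pyRange h (l+1) 1).length := by
          rw [hIJ]; omega
        have hfe : (PySem.List.pyRange h (l+1) 1).filter q = PySem.List.pyRange h (l+1) 1 :=
          List.filter_sublist.eq_of_length hlen2
        rw [List.all_eq_true]
        intro x hx
        exact List.of_mem_filter (by rw [hfe]; exact hx)
      · intro hall
        have hfe : (PySem.List.pyRange h (l+1) 1).filter q = PySem.List.pyRange h (l+1) 1 := by
          rw [List.filter_eq_self]
          intro a ha
          exact (List.all_eq_true.1 hall) a ha
        rw [← hIJ, hfe]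
        omega
    rcases Bool.eq_false_or_eq_true ((PySem.List.pyRange h (l+1) 1).all q) with hb | hb
    · rw [hb]
      exact (decide_eq_true (hiff.2 hb)).symm
    · rw [hb]
      exact (decide_eq_false (fun hcon => Bool.false_ne_true (hb.symm.trans (hiff.1 hcon)))).symm

-- ===== VERDICT (by name: the statement is the Claim_ definition above) =====
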